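-- pv_equiv track=rewrite | github.com/LKDVSolutions/repo-foundation | doc-governance-template/scripts/manage_session.py | _extract_checkpoint
-- ===== SOURCE A (Python) =====
-- def _extract_checkpoint(content: str) -> tuple[str, int, str]:
--     resume_file = ""
--     resume_line = 1
--     summary = ""
--     for line in content.splitlines():
--         if line.startswith("- resume_target_file:"):
--             resume_file = line.split(":", 1)[1].strip()
--         elif line.startswith("- resume_target_line:"):
--             try:
--                 resume_line = int(line.split(":", 1)[1].strip())
--             except ValueError:
--                 resume_line = 1
--         elif line.startswith("- checkpoint_summary:"):
--             summary = line.split(":", 1)[1].strip()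
--     return resume_file, resume_line, summary
-- ===== SOURCE B (Python) =====
-- def _extract_checkpoint(content: str) -> tuple[str, int, str]:
--     # Build a table of all "key: value" lines (last occurrence wins), then
--     # extract the three fields by lookup with defaults.
--     table = {}
--     for line in content.splitlines():
--         parts = line.split(":", 1)
--         if len(parts) == 2:
--             table[parts[0]] = parts[1].strip()
--     resume_file = table.get("- resume_target_file", "")
--     summary = table.get("- checkpoint_summary", "")
--     try:
--         resume_line = int(table["- resume_target_line"])
--     except (KeyError, ValueError):
--         resume_line = 1
--     return resume_file, resume_line, summary
-- ===== Notes on version B (the rewrite author's own statement) =====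
-- stated objective: alternative
-- what changed: B replaces A's per-line three-branch startswith dispatch by a generic pass that splits every line once at the first colon into a last-wins table and then extracts the three fields by dict lookups with defaults (int conversion with its KeyError/ValueError fallback applied only at extraction).
import Mathlib
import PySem

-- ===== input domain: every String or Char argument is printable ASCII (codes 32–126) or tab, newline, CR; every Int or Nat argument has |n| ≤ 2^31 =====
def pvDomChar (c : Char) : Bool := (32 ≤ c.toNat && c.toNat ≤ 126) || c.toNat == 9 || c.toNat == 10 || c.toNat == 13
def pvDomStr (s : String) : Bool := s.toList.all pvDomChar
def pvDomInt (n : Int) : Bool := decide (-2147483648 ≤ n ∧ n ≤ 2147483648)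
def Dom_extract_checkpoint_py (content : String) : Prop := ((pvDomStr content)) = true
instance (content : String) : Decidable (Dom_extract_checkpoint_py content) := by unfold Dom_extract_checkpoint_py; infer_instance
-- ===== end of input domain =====

-- B replaces A's branch-dispatch scan by one generic "split every line once at the first colon into a table
-- (last key wins), then look the three fields up with defaults" pass (objective: alternative).

-- ===== PORT A =====
-- loop body of A's 'for line in content.splitlines()' (branch chain in A's order;
-- 'line.split(":", 1)[1]' is ported as '.getD 1 ""': inside each branch the line contains ':',
-- so index 1 exists and the default is never used)
def pvStepA (s : String × Int × String) (line : String) : String × Int × String :=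
  if PySem.Str.startswith line "- resume_target_file:" then
    (PySem.Str.strip (((PySem.Str.splitMax? line ":" 1).getD []).getD 1 ""), s.2.1, s.2.2)
  else if PySem.Str.startswith line "- resume_target_line:" then
    (s.1, (PySem.Int.ofStr? (PySem.Str.strip (((PySem.Str.splitMax? line ":" 1).getD []).getD 1 ""))).getD 1, s.2.2)
  else if PySem.Str.startswith line "- checkpoint_summary:" then
    (s.1, s.2.1, PySem.Str.strip (((PySem.Str.splitMax? line ":" 1).getD []).getD 1 ""))
  else s

def extract_checkpoint_py (content : String) : String × Int × String :=
  (PySem.Str.splitlines content).foldl pvStepA ("", 1, "")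

-- ===== PORT B =====
-- loop body of B's table-building pass: 'parts = line.split(":", 1); if len(parts) == 2: table[parts[0]] = parts[1].strip()'
def pvStepB (d : PySem.Dict String String) (line : String) : PySem.Dict String String :=
  let parts := (PySem.Str.splitMax? line ":" 1).getD []
  if parts.length == 2 then d.insert (parts.getD 0 "") (PySem.Str.strip (parts.getD 1 "")) else d

def extract_checkpoint_py_alt (content : String) : String × Int × String :=
  let table := (PySem.Str.splitlines content).foldl pvStepB PySem.Dict.empty
  (table.getD "- resume_target_file" "",
   (match table.get? "- resume_target_line" with
    | some v => (PySem.Int.ofStr? v).getD 1   -- 'int(...)' with ValueError → 1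
    | none => 1),                             -- KeyError → 1
   table.getD "- checkpoint_summary" "")

-- ===== PRECONDITION & SPEC =====
def Spec_extract_checkpoint_py (content : String) (out : String × Int × String) : Prop := out = extract_checkpoint_py_alt content
instance (content : String) (out : String × Int × String) : Decidable (Spec_extract_checkpoint_py content out) := by unfold Spec_extract_checkpoint_py; infer_instance

-- ===== CLAIM (what is proved, stated in full; the proofs are below) =====
def Claim_equal_extract_checkpoint_py : Prop := ∀ (content : String), Dom_extract_checkpoint_py content → Spec_extract_checkpoint_py content (extract_checkpoint_py content)

-- ===== LEMMAS AND PROOFS =====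

-- B's three lookups, as a function of the table (extract_checkpoint_py_alt content
-- = pvExtract (table built from content's lines))
def pvExtract (d : PySem.Dict String String) : String × Int × String :=
  (d.getD "- resume_target_file" "",
   (match d.get? "- resume_target_line" with
    | some v => (PySem.Int.ofStr? v).getD 1
    | none => 1),
   d.getD "- checkpoint_summary" "")

-- splitOnMax.go with maxsplit exhausted keeps the rest as one piece
theorem pv_go_zero (fuel : Nat) (l cur : List Char) (acc : List (List Char)) :
    PySem.Chars.splitOnMax.go [':'] fuel 0 l cur acc = ((cur.reverse ++ l) :: acc).reverse := by
  cases fuel <;> cases l <;> simp [PySem.Chars.splitOnMax.go]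

-- splitOnMax.go with maxsplit 1: split at the first ':' if any
theorem pv_go_one (fuel : Nat) (l cur : List Char) (acc : List (List Char)) (h : l.length < fuel) :
    PySem.Chars.splitOnMax.go [':'] fuel 1 l cur acc =
      if ':' ∈ l then
        acc.reverse ++ [cur.reverse ++ l.takeWhile (· ≠ ':'), (l.dropWhile (· ≠ ':')).tail]
      else acc.reverse ++ [cur.reverse ++ l] := by
  induction fuel generalizing l cur acc with
  | zero => omega
  | succ f ih =>
    cases l with
    | nil => simp [PySem.Chars.splitOnMax.go]
    | cons c rest =>
      by_cases hc : c = ':'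
      · subst hc
        simp [PySem.Chars.splitOnMax.go, pv_go_zero]
      · have : rest.length < f := by simpa using h
        simp [PySem.Chars.splitOnMax.go, List.isPrefixOf, hc, Ne.symm hc, ih rest _ _ this]

-- line.split(":", 1) on the char level
theorem pv_splitOnMax_one (l : List Char) :
    PySem.Chars.splitOnMax l [':'] 1 =
      if ':' ∈ l then [l.takeWhile (· ≠ ':'), (l.dropWhile (· ≠ ':')).tail] else [l] := by
  have h : l.length < l.length + 1 := Nat.lt_succ_self _
  simp [PySem.Chars.splitOnMax, pv_go_one (l.length + 1) l [] [] h]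

-- if ':' occurs in l, l = takeWhile ++ ':' :: tail of dropWhile
theorem pv_decomp (l : List Char) (h : ':' ∈ l) :
    l = l.takeWhile (· ≠ ':') ++ ':' :: (l.dropWhile (· ≠ ':')).tail := by
  have hne : l.dropWhile (· ≠ ':') ≠ [] := by
    simp only [ne_eq, List.dropWhile_eq_nil_iff]
    intro hall
    have := hall ':' h
    simp at this
  have hhead : (l.dropWhile (· ≠ ':')).head hne = ':' := by
    have := List.head_dropWhile_not (fun c => decide (c ≠ ':')) hne
    simpa using this
  obtain ⟨c, t, hct⟩ := List.exists_cons_of_ne_nil hne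
  have hc : c = ':' := by
    have h3 : (l.dropWhile (· ≠ ':')).head? = some c := by rw [hct]; rfl
    have h4 : (l.dropWhile (· ≠ ':')).head? = some ':' := by
      rw [List.head?_eq_some_head hne, hhead]
    rw [h3] at h4
    exact (Option.some_inj.mp h4)
  conv_lhs => rw [← List.takeWhile_append_dropWhile (p := (· ≠ ':')) (l := l)]
  rw [hct, hc]
  simp

-- takeWhile up to the first colon of "key ++ ':' :: rest" is the key
theorem pv_takeWhile_key (k t : List Char) (hk : ':' ∉ k) :
    (k ++ ':' :: t).takeWhile (· ≠ ':') = k := by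
  induction k with
  | nil => simp
  | cons c cs ih =>
    have hc : c ≠ ':' := fun h => hk (h ▸ List.mem_cons_self)
    have hcs : ':' ∉ cs := fun h => hk (List.mem_cons_of_mem _ h)
    simp only [List.cons_append, List.takeWhile_cons]
    simp only [hc, decide_not]
    simpa [hc] using ih hcs

-- startswith (k ++ ":") characterised by the first-colon split (for ':'-free k)
theorem pv_startswith_iff (l k : List Char) (hk : ':' ∉ k) :
    PySem.Chars.startswith l (k ++ [':']) = true ↔ ':' ∈ l ∧ l.takeWhile (· ≠ ':') = k := by
  constructor
  · intro h
    rw [PySem.Chars.startswith_iff] at h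
    obtain ⟨t, ht⟩ := h
    subst ht
    constructor
    · simp
    · simpa [List.append_assoc] using pv_takeWhile_key k t hk
  · rintro ⟨h, hk'⟩
    rw [PySem.Chars.startswith_iff]
    have := pv_decomp l h
    rw [hk'] at this
    refine ⟨(l.dropWhile (· ≠ ':')).tail, ?_⟩
    conv_rhs => rw [this]
    simp

-- string keys are distinguished by their first-colon prefix
theorem pv_ofList_ne (p : List Char) (k : String) (h : p ≠ k.toList) :
    String.ofList p ≠ k := by
  intro he
  exact h (by rw [← he, String.toList_ofList])

-- the per-line step correspondence: A's branch chain on B's extracted view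
theorem pv_step (d : PySem.Dict String String) (line : String) :
    pvStepA (pvExtract d) line = pvExtract (pvStepB d line) := by
  have d21 : ("- resume_target_line" : String) ≠ "- resume_target_file" := by decide
  have d31 : ("- checkpoint_summary" : String) ≠ "- resume_target_file" := by decide
  have d12 : ("- resume_target_file" : String) ≠ "- resume_target_line" := by decide
  have d32 : ("- checkpoint_summary" : String) ≠ "- resume_target_line" := by decide
  have d13 : ("- resume_target_file" : String) ≠ "- checkpoint_summary" := by decide
  have d23 : ("- resume_target_line" : String) ≠ "- checkpoint_summary" := by decide
  have hk1 : ':' ∉ ("- resume_target_file" : String).toList := by decide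
  have hk2 : ':' ∉ ("- resume_target_line" : String).toList := by decide
  have hk3 : ':' ∉ ("- checkpoint_summary" : String).toList := by decide
  have hs1 : PySem.Str.startswith line "- resume_target_file:" = true ↔
      ':' ∈ line.toList ∧ line.toList.takeWhile (· ≠ ':') = ("- resume_target_file" : String).toList := by
    rw [PySem.Str.startswith_eq,
        show ("- resume_target_file:" : String).toList
           = ("- resume_target_file" : String).toList ++ [':'] from by decide]
    exact pv_startswith_iff line.toList _ hk1
  have hs2 : PySem.Str.startswith line "- resume_target_line:" = true ↔
      ':' ∈ line.toList ∧ line.toList.takeWhile (· ≠ ':') = ("- resume_target_line" : String).toList := by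
    rw [PySem.Str.startswith_eq,
        show ("- resume_target_line:" : String).toList
           = ("- resume_target_line" : String).toList ++ [':'] from by decide]
    exact pv_startswith_iff line.toList _ hk2
  have hs3 : PySem.Str.startswith line "- checkpoint_summary:" = true ↔
      ':' ∈ line.toList ∧ line.toList.takeWhile (· ≠ ':') = ("- checkpoint_summary" : String).toList := by
    rw [PySem.Str.startswith_eq,
        show ("- checkpoint_summary:" : String).toList
           = ("- checkpoint_summary" : String).toList ++ [':'] from by decide]
    exact pv_startswith_iff line.toList _ hk3
  have hparts : (PySem.Str.splitMax? line ":" 1).getD []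
      = (PySem.Chars.splitOnMax line.toList [':'] 1).map String.ofList := by
    simp [PySem.Str.splitMax?, PySem.Chars.splitMax?]
  by_cases hcol : ':' ∈ line.toList
  · -- the line contains a colon: split is [key, rest]; B records it, A may use it
    set p := line.toList.takeWhile (· ≠ ':') with hp
    set r := (line.toList.dropWhile (· ≠ ':')).tail with hr
    have hparts2 : (PySem.Str.splitMax? line ":" 1).getD [] = [String.ofList p, String.ofList r] := by
      rw [hparts, pv_splitOnMax_one, if_pos hcol]; rfl
    by_cases hp1 : p = ("- resume_target_file" : String).toList
    · have ha : PySem.Str.startswith line "- resume_target_file:" = true := hs1.mpr ⟨hcol, hp1⟩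
      have hof : String.ofList p = "- resume_target_file" := by
        rw [hp1, String.ofList_toList]
      simp only [pvStepA, pvStepB, hparts2, ha]
      simp only [hof, pvExtract, List.length_cons, List.length_nil, List.getD, beq_iff_eq,
        List.getElem?_cons_zero, List.getElem?_cons_succ, Option.getD_some, ite_true,
        PySem.Dict.getD_insert, PySem.Dict.get?_insert]
      simp only [if_neg d21, if_neg d31]
    · by_cases hp2 : p = ("- resume_target_line" : String).toList
      · have ha : PySem.Str.startswith line "- resume_target_line:" = true := hs2.mpr ⟨hcol, hp2⟩
        have hna : PySem.Str.startswith line "- resume_target_file:" = false := by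
          rw [← Bool.not_eq_true, hs1]; exact fun h => hp1 h.2
        have hof : String.ofList p = "- resume_target_line" := by
          rw [hp2, String.ofList_toList]
        simp only [pvStepA, pvStepB, hparts2, ha, hna, Bool.false_eq_true, if_false]
        simp only [hof, pvExtract, List.length_cons, List.length_nil, List.getD, beq_iff_eq,
          List.getElem?_cons_zero, List.getElem?_cons_succ, Option.getD_some, ite_true,
          PySem.Dict.getD_insert, PySem.Dict.get?_insert]
        simp only [if_neg d12, if_neg d32]
      · by_cases hp3 : p = ("- checkpoint_summary" : String).toList
        · have ha : PySem.Str.startswith line "- checkpoint_summary:" = true := hs3.mpr ⟨hcol, hp3⟩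
          have hna1 : PySem.Str.startswith line "- resume_target_file:" = false := by
            rw [← Bool.not_eq_true, hs1]; exact fun h => hp1 h.2
          have hna2 : PySem.Str.startswith line "- resume_target_line:" = false := by
            rw [← Bool.not_eq_true, hs2]; exact fun h => hp2 h.2
          have hof : String.ofList p = "- checkpoint_summary" := by
            rw [hp3, String.ofList_toList]
          simp only [pvStepA, pvStepB, hparts2, ha, hna1, hna2, Bool.false_eq_true, if_false]
          simp only [hof, pvExtract, List.length_cons, List.length_nil, List.getD, beq_iff_eq,
            List.getElem?_cons_zero, List.getElem?_cons_succ, Option.getD_some, ite_true,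
            PySem.Dict.getD_insert, PySem.Dict.get?_insert]
          simp only [if_neg d13, if_neg d23]
        · -- some unrelated key: A ignores the line, B's insert is invisible to the lookups
          have hna1 : PySem.Str.startswith line "- resume_target_file:" = false := by
            rw [← Bool.not_eq_true, hs1]; exact fun h => hp1 h.2
          have hna2 : PySem.Str.startswith line "- resume_target_line:" = false := by
            rw [← Bool.not_eq_true, hs2]; exact fun h => hp2 h.2
          have hna3 : PySem.Str.startswith line "- checkpoint_summary:" = false := by
            rw [← Bool.not_eq_true, hs3]; exact fun h => hp3 h.2
          have hne1 : ("- resume_target_file" : String) ≠ String.ofList p :=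
            Ne.symm (pv_ofList_ne p "- resume_target_file" hp1)
          have hne2 : ("- resume_target_line" : String) ≠ String.ofList p :=
            Ne.symm (pv_ofList_ne p "- resume_target_line" hp2)
          have hne3 : ("- checkpoint_summary" : String) ≠ String.ofList p :=
            Ne.symm (pv_ofList_ne p "- checkpoint_summary" hp3)
          simp only [pvStepA, pvStepB, hparts2, hna1, hna2, hna3, Bool.false_eq_true, if_false]
          simp only [pvExtract, List.length_cons, List.length_nil, List.getD, beq_iff_eq,
            List.getElem?_cons_zero, List.getElem?_cons_succ, Option.getD_some, ite_true,
            PySem.Dict.getD_insert, PySem.Dict.get?_insert]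
          simp only [if_neg hne1, if_neg hne2, if_neg hne3]
  · -- no colon: neither side does anything
    have hparts1 : (PySem.Str.splitMax? line ":" 1).getD [] = [String.ofList line.toList] := by
      rw [hparts, pv_splitOnMax_one, if_neg hcol]; rfl
    have hna1 : PySem.Str.startswith line "- resume_target_file:" = false := by
      rw [← Bool.not_eq_true, hs1]; exact fun h => hcol h.1
    have hna2 : PySem.Str.startswith line "- resume_target_line:" = false := by
      rw [← Bool.not_eq_true, hs2]; exact fun h => hcol h.1
    have hna3 : PySem.Str.startswith line "- checkpoint_summary:" = false := by
      rw [← Bool.not_eq_true, hs3]; exact fun h => hcol h.1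
    simp only [pvStepA, pvStepB, hparts1, hna1, hna2, hna3, Bool.false_eq_true, if_false,
      List.length_cons, List.length_nil, (show ((0+1:Nat) == 2) = false by rfl)]

-- the whole loop
theorem pv_fold (lines : List String) (d : PySem.Dict String String) :
    lines.foldl pvStepA (pvExtract d) = pvExtract (lines.foldl pvStepB d) := by
  induction lines generalizing d with
  | nil => rfl
  | cons l rest ih => rw [List.foldl_cons, List.foldl_cons, pv_step, ih]

-- ===== VERDICT (by name: the statement is the Claim_ definition above) =====
theorem extract_checkpoint_py_spec : Claim_equal_extract_checkpoint_py := by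
  intro content _
  unfold Spec_extract_checkpoint_py extract_checkpoint_py extract_checkpoint_py_alt
  have hinit : (("", 1, "") : String × Int × String) = pvExtract PySem.Dict.empty := by
    simp [pvExtract, PySem.Dict.getD_empty, PySem.Dict.get?_empty]
  rw [hinit, pv_fold]
  rfl
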